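-- pv_equiv track=rewrite | github.com/kuhumcst/korp-setups | setups/lancharttest/exporter/korpexport/queryresult.py | _combine_struct_attrs
-- ===== SOURCE A (Python) =====
-- def _combine_struct_attrs(structs, struct_type):
--     """Combine the attributes in structures `structs`.
--
--     Return the structures `structs` so that each XML element is
--     represented only once with a list of its attributes.
--
--     Note that the function assumes that element names do not contain
--     underscores, whereas attribute names may contain them.
--     """
--     result_structs = []
--     for struct in structs:
--         if struct_type == "open":
--             struct, sp, attrval = struct.partition(" ")
--             if not sp:
--                 attrval = None
--         else:
--             attrval = None
--         struct, _, attrname = struct.partition("_")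
--         if not result_structs or result_structs[-1][0] != struct:
--             result_structs.append((struct, []))
--         if attrval is not None:
--             result_structs[-1][1].append((attrname, attrval))
--     return result_structs
-- ===== SOURCE B (Python) =====
-- def _parse_struct(struct, struct_type):
--     """Parse one struct string into (element, attrname, attrval-or-None)."""
--     if struct_type == "open":
--         head, sp, attrval = struct.partition(" ")
--         if not sp:
--             attrval = None
--     else:
--         head, attrval = struct, None
--     elem, _, attrname = head.partition("_")
--     return elem, attrname, attrval
--
--
-- def _combine_struct_attrs(structs, struct_type):
--     parsed = [_parse_struct(s, struct_type) for s in structs]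
--     result = []
--     i = 0
--     n = len(parsed)
--     while i < n:
--         elem = parsed[i][0]
--         j = i + 1
--         while j < n and parsed[j][0] == elem:
--             j += 1
--         result.append((elem,
--                        [(name, val) for _, name, val in parsed[i:j]
--                         if val is not None]))
--         i = j
--     return result
-- ===== Notes on version B (the rewrite author's own statement) =====
-- stated objective: idiomatic
-- what changed: Replaces the interleaved compare-with-last-and-mutate single pass by a two-phase decomposition: parse every struct into (element, attrname, attrval) first, then scan runs of equal element names and emit each group with a comprehension.
import Mathlib
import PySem

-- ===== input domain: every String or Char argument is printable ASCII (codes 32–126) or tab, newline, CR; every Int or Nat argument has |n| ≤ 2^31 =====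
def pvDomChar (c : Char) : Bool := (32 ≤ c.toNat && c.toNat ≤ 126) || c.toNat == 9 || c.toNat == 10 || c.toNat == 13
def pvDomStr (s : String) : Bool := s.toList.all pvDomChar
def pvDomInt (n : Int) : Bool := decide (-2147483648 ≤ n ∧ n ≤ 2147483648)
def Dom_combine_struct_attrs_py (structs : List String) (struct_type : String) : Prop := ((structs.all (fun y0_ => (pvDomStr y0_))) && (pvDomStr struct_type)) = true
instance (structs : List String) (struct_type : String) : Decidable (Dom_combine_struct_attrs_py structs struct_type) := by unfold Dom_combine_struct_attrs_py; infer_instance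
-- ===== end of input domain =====

-- B replaces A's interleaved compare-with-last-and-mutate pass by a two-phase
-- decomposition (parse every struct, then scan runs of equal element names); idiomatic, same cost.


-- ===== PORT A =====
-- shared helper: Python's str.partition(sep) for a single-character separator
-- (both separators in the sources, " " and "_", are single characters; exact there)
def pyPartChars (sep : Char) : List Char → Option (List Char × List Char)
  | [] => none
  | c :: cs =>
    if c = sep then some ([], cs)
    else (pyPartChars sep cs).map (fun p => (c :: p.1, p.2))

def pyPartition (s : String) (sep : Char) : String × String × String :=
  match pyPartChars sep s.toList with
  | none => (s, "", "")
  | some (a, b) => (String.ofList a, String.ofList [sep], String.ofList b)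

def combine_struct_attrs_py (structs : List String) (struct_type : String) : List (String × (List (String × String))) :=
  structs.foldl (fun result_structs struct0 =>
    -- if struct_type == "open": struct, sp, attrval = struct.partition(" "); attrval = None if not sp
    let (struct1, attrval) : String × Option String :=
      if struct_type = "open" then
        let (s, sp, av) := pyPartition struct0 ' '
        (s, if sp = "" then none else some av)
      else (struct0, none)
    -- struct, _, attrname = struct.partition("_")
    let (struct2, _, attrname) := pyPartition struct1 '_'
    -- if not result_structs or result_structs[-1][0] != struct: append (struct, [])
    let result_structs :=
      if result_structs.isEmpty || !((result_structs.getLast!).1 = struct2) then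
        result_structs ++ [(struct2, [])]
      else result_structs
    -- if attrval is not None: result_structs[-1][1].append((attrname, attrval))
    match attrval with
    | some v => result_structs.dropLast ++ [((result_structs.getLast!).1, (result_structs.getLast!).2 ++ [(attrname, v)])]
    | none => result_structs) []

-- ===== PORT B =====
-- _parse_struct(struct, struct_type) -> (elem, attrname, attrval)
def parse_struct (struct0 struct_type : String) : String × String × Option String :=
  let (head, attrval) : String × Option String :=
    if struct_type = "open" then
      let (h, sp, av) := pyPartition struct0 ' '
      (h, if sp = "" then none else some av)
    else (struct0, none)
  let (elem, _, attrname) := pyPartition head '_'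
  (elem, attrname, attrval)

-- the outer while loop: take the run of parsed entries sharing the element name,
-- emit one group built by the comprehension, continue after the run
def runsB : List (String × String × Option String) → List (String × (List (String × String)))
  | [] => []
  | p :: ps =>
    (p.1, ((p :: ps.takeWhile (fun q => q.1 = p.1)).filterMap
              (fun q => q.2.2.map (fun v => (q.2.1, v)))))
      :: runsB (ps.dropWhile (fun q => q.1 = p.1))
  termination_by l => l.length
  decreasing_by
    simpa using Nat.lt_succ_of_le (List.length_dropWhile_le _ _)

def combine_struct_attrs_py_alt (structs : List String) (struct_type : String) : List (String × (List (String × String))) :=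
  runsB (structs.map (fun s => parse_struct s struct_type))

-- ===== PRECONDITION & SPEC =====
def Spec_combine_struct_attrs_py (structs : List String) (struct_type : String) (out : List (String × (List (String × String)))) : Prop := out = combine_struct_attrs_py_alt structs struct_type
instance (structs : List String) (struct_type : String) (out : List (String × (List (String × String)))) : Decidable (Spec_combine_struct_attrs_py structs struct_type out) := by unfold Spec_combine_struct_attrs_py; infer_instance

-- ===== CLAIM (what is proved, stated in full; the proofs are below) =====
def Claim_equal_combine_struct_attrs_py : Prop := ∀ (structs : List String) (struct_type : String), Dom_combine_struct_attrs_py structs struct_type → Spec_combine_struct_attrs_py structs struct_type (combine_struct_attrs_py structs struct_type)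

-- ===== LEMMAS AND PROOFS =====

-- attribute list contributed by one parsed entry
def attL (p : String × String × Option String) : List (String × String) :=
  match p.2.2 with
  | some v => [(p.2.1, v)]
  | none => []

-- prepend a group onto a grouped list, merging with an equal-keyed head
def glue (g : String × List (String × String)) :
    List (String × List (String × String)) → List (String × List (String × String))
  | [] => [g]
  | (e', l') :: t => if e' = g.1 then (g.1, g.2 ++ l') :: t else g :: (e', l') :: t

-- right-to-left specification of consecutive grouping
def specG : List (String × String × Option String) → List (String × (List (String × String)))
  | [] => []
  | p :: ps => glue (p.1, attL p) (specG ps)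

-- A's loop body, factored through the parsed value
def stepP (acc : List (String × (List (String × String))))
    (p : String × String × Option String) : List (String × (List (String × String))) :=
  let acc' :=
    if acc.isEmpty || !((acc.getLast!).1 = p.1) then acc ++ [(p.1, [])] else acc
  match p.2.2 with
  | some v => acc'.dropLast ++ [((acc'.getLast!).1, (acc'.getLast!).2 ++ [(p.2.1, v)])]
  | none => acc'

theorem stepA_eq (struct_type : String) (acc : List (String × (List (String × String)))) (s : String) :
    (fun result_structs struct0 =>
      let (struct1, attrval) : String × Option String :=
        if struct_type = "open" then
          let (s, sp, av) := pyPartition struct0 ' '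
          (s, if sp = "" then none else some av)
        else (struct0, none)
      let (struct2, _, attrname) := pyPartition struct1 '_'
      let result_structs :=
        if result_structs.isEmpty || !((result_structs.getLast!).1 = struct2) then
          result_structs ++ [(struct2, [])]
        else result_structs
      match attrval with
      | some v => result_structs.dropLast ++ [((result_structs.getLast!).1, (result_structs.getLast!).2 ++ [(attrname, v)])]
      | none => result_structs) acc s = stepP acc (parse_struct s struct_type) := by
  by_cases h : struct_type = "open"
  · rcases hp : pyPartition s ' ' with ⟨a, b, c⟩
    by_cases hb : b = "" <;>
      rcases hq : pyPartition a '_' with ⟨x, y, z⟩ <;>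
      simp [parse_struct, stepP, h, hp, hb, hq]
  · rcases hq : pyPartition s '_' with ⟨x, y, z⟩
    simp [parse_struct, stepP, h, hq]

theorem glueHead (g : String × List (String × String)) (t : List (String × (List (String × String)))) :
    ∃ l t', glue g t = (g.1, l) :: t' := by
  match t with
  | [] => exact ⟨g.2, [], rfl⟩
  | (e', l') :: t =>
    by_cases h : e' = g.1
    · exact ⟨g.2 ++ l', t, by simp [glue, h]⟩
    · exact ⟨g.2, (e', l') :: t, by simp [glue, h]⟩

theorem glue_glue (e : String) (l m : List (String × String)) (t : List (String × (List (String × String)))) :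
    glue (e, l) (glue (e, m) t) = glue (e, l ++ m) t := by
  match t with
  | [] => simp [glue]
  | (e', l') :: t =>
    by_cases h : e' = e <;> simp [glue, h]

-- A's fold from a nonempty accumulator, against the right-fold spec
theorem foldA (ps : List (String × String × Option String)) :
    ∀ (pre : List (String × (List (String × String)))) (e0 : String) (l0 : List (String × String)),
    (ps.foldl stepP (pre ++ [(e0, l0)])) = pre ++ glue (e0, l0) (specG ps) := by
  induction ps with
  | nil => intro pre e0 l0; simp [specG, glue]
  | cons p ps ih =>
    intro pre e0 l0
    obtain ⟨e, n, av⟩ := p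
    by_cases he : e0 = e
    · subst he
      have hstep : stepP (pre ++ [(e0, l0)]) (e0, n, av)
          = pre ++ [(e0, l0 ++ attL (e0, n, av))] := by
        cases av with
        | none => simp [stepP, attL]
        | some v => simp [stepP, attL]
      rw [List.foldl_cons, hstep, ih pre e0 (l0 ++ attL (e0, n, av))]
      simp only [specG, glue_glue]
    · have hstep : stepP (pre ++ [(e0, l0)]) (e, n, av)
          = (pre ++ [(e0, l0)]) ++ [(e, attL (e, n, av))] := by
        cases av with
        | none => simp [stepP, attL, he]
        | some v => simp [stepP, attL, he]
      rw [List.foldl_cons, hstep, ih (pre ++ [(e0, l0)]) e (attL (e, n, av))]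
      obtain ⟨l, t', hg⟩ := glueHead (e, attL (e, n, av)) (specG ps)
      simp only [specG]
      rw [hg]
      simp [glue, Ne.symm he]

theorem specG_run (e : String) (l : List (String × String)) :
    ∀ (run rest : List (String × String × Option String)),
      (∀ q ∈ run, q.1 = e) →
      glue (e, l) (specG (run ++ rest)) = glue (e, l ++ run.flatMap attL) (specG rest) := by
  intro run
  induction run generalizing l with
  | nil => intro rest _; simp
  | cons q run ih =>
    intro rest hall
    have hq : q.1 = e := hall q (by simp)
    have hrun : ∀ r ∈ run, r.1 = e := fun r hr => hall r (by simp [hr])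
    simp only [List.cons_append, specG, hq, glue_glue]
    rw [ih (l ++ attL q) rest hrun]
    simp

theorem filterMap_eq_flatMap_attL (l : List (String × String × Option String)) :
    l.filterMap (fun q => q.2.2.map (fun v => (q.2.1, v))) = l.flatMap attL := by
  induction l with
  | nil => rfl
  | cons q l ih =>
    cases h : q.2.2 <;> simp [List.filterMap_cons, h, attL, ih]

theorem runsB_eq_specG : ∀ (ps : List (String × String × Option String)), runsB ps = specG ps := by
  intro ps
  induction ps using runsB.induct with
  | case1 => simp [runsB, specG]
  | case2 p ps ih =>
    rw [runsB, ih]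
    symm
    have hsplit : ps = ps.takeWhile (fun q => q.1 = p.1) ++ ps.dropWhile (fun q => q.1 = p.1) :=
      (List.takeWhile_append_dropWhile).symm
    have hall : ∀ q ∈ ps.takeWhile (fun q => q.1 = p.1), q.1 = p.1 := by
      intro q hq
      have := List.mem_takeWhile_imp hq
      simpa using this
    calc specG (p :: ps)
        = glue (p.1, attL p) (specG ps) := rfl
      _ = glue (p.1, attL p) (specG (ps.takeWhile (fun q => q.1 = p.1) ++ ps.dropWhile (fun q => q.1 = p.1))) := by rw [← hsplit]
      _ = glue (p.1, attL p ++ (ps.takeWhile (fun q => q.1 = p.1)).flatMap attL) (specG (ps.dropWhile (fun q => q.1 = p.1))) := specG_run _ _ _ _ hall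
      _ = (p.1, attL p ++ (ps.takeWhile (fun q => q.1 = p.1)).flatMap attL) :: specG (ps.dropWhile (fun q => q.1 = p.1)) := by
            cases hd : ps.dropWhile (fun q => q.1 = p.1) with
            | nil => rfl
            | cons r t =>
              have hne : ¬ (r.1 = p.1) := by
                have := List.head?_dropWhile_not (fun q : String × String × Option String => decide (q.1 = p.1)) ps
                rw [hd] at this
                simpa using this
              obtain ⟨l', t', hg⟩ := glueHead (r.1, attL r) (specG t)
              simp only [specG]
              rw [hg]
              simp [glue, hne]
      _ = (p.1, (p :: ps.takeWhile (fun q => q.1 = p.1)).filterMap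
              (fun q => q.2.2.map (fun v => (q.2.1, v)))) :: specG (ps.dropWhile (fun q => q.1 = p.1)) := by
            rw [filterMap_eq_flatMap_attL, List.flatMap_cons]

theorem foldP : ∀ (L : List (String × String × Option String)), L.foldl stepP [] = specG L := by
  intro L
  cases L with
  | nil => rfl
  | cons p ps =>
    obtain ⟨e, n, av⟩ := p
    have hfirst : stepP [] (e, n, av) = [] ++ [(e, attL (e, n, av))] := by
      cases av with
      | none => simp [stepP, attL]
      | some v => simp [stepP, attL]
    rw [List.foldl_cons, hfirst, foldA]
    simp [specG]

-- ===== VERDICT (by name: the statement is the Claim_ definition above) =====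
theorem combine_struct_attrs_py_spec : Claim_equal_combine_struct_attrs_py := by
  intro structs struct_type _
  unfold Spec_combine_struct_attrs_py combine_struct_attrs_py combine_struct_attrs_py_alt
  rw [runsB_eq_specG]
  have hfun : (fun result_structs struct0 =>
      let (struct1, attrval) : String × Option String :=
        if struct_type = "open" then
          let (s, sp, av) := pyPartition struct0 ' '
          (s, if sp = "" then none else some av)
        else (struct0, none)
      let (struct2, _, attrname) := pyPartition struct1 '_'
      let result_structs :=
        if result_structs.isEmpty || !((result_structs.getLast!).1 = struct2) then
          result_structs ++ [(struct2, [])]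
        else result_structs
      match attrval with
      | some v => result_structs.dropLast ++ [((result_structs.getLast!).1, (result_structs.getLast!).2 ++ [(attrname, v)])]
      | none => result_structs)
      = (fun acc s => stepP acc (parse_struct s struct_type)) := by
    funext acc s
    exact stepA_eq struct_type acc s
  rw [hfun]
  calc structs.foldl (fun acc s => stepP acc (parse_struct s struct_type)) []
      = (structs.map (fun s => parse_struct s struct_type)).foldl stepP [] := by
        rw [List.foldl_map]
    _ = specG (structs.map (fun s => parse_struct s struct_type)) :=
        foldP _
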